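-- pv_equiv track=rewrite | github.com/parthjpatel99/Bctci-code-solutions | sets and maps/find_all_squares.py | find_squared
-- ===== SOURCE A (Python) =====
-- def find_squared(arr):
--     res = []
--     map = {}
--
--     for i, num in enumerate(arr):
--         if num not in map:
--             map[num] = i
--
--     for i, num in enumerate(arr):
--         sq = num * num
--         if sq in map:
--             res.append([i, map[sq]])
--     return res
-- ===== SOURCE B (Python) =====
-- def find_squared(arr):
--     # Single forward pass: when a value first appears, resolve all earlier
--     # indices that were waiting for it as their square; emit pairs in index order.
--     first = {}    # value -> first occurrence index
--     pending = {}  # awaited square value -> indices waiting for it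
--     done = {}     # index i -> first index of arr[i]**2
--     for j, x in enumerate(arr):
--         if x not in first:
--             first[x] = j
--             for i in pending.get(x, []):
--                 done[i] = j
--         sq = x * x
--         if sq in first:
--             done[j] = first[sq]
--         else:
--             pending.setdefault(sq, []).append(j)
--     res = []
--     for i in range(len(arr)):
--         if i in done:
--             res.append([i, done[i]])
--     return res
-- ===== Notes on version B (the rewrite author's own statement) =====
-- stated objective: alternative
-- what changed: Replaced the two staged passes (prebuild a first-occurrence map, then look up each square) by a single online pass that, when a value first appears, resolves all earlier indices pending on it as their square, collecting results keyed by index and emitting them in index order.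
import Mathlib
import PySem

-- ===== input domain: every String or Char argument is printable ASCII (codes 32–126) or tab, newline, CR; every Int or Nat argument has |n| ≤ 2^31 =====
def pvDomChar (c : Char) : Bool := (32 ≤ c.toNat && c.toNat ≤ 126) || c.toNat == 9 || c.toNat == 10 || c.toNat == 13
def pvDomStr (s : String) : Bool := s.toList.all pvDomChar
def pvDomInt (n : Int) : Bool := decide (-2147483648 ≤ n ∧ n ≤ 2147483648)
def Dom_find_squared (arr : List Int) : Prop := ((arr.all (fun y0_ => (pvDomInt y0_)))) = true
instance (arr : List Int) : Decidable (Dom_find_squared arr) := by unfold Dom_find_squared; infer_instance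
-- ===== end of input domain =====

-- B replaces A's two staged passes (prebuild first-occurrence map, then look up each square)
-- by a single online pass resolving pending squares at each value's first occurrence,
-- emitting results in index order; same return value on all inputs (objective: alternative).

-- ===== PORT A =====
def find_squared (arr : List Int) : List (List Int) :=
  let map := (PySem.List.enumerate arr).foldl
    (fun m p => if m.contains p.2 then m else m.insert p.2 p.1) PySem.Dict.empty
  (PySem.List.enumerate arr).foldl
    (fun res p =>
      let sq := p.2 * p.2
      if map.contains sq then res ++ [[p.1, map.getD sq 0]] else res) []

-- ===== PORT B =====
-- one step of B's single pass: state = (first, pending, done), element = (j, x)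
def bStep (s : PySem.Dict Int Int × PySem.Dict Int (List Int) × PySem.Dict Int Int)
    (p : Int × Int) : PySem.Dict Int Int × PySem.Dict Int (List Int) × PySem.Dict Int Int :=
  let fd :=
    if s.1.contains p.2 then (s.1, s.2.2)
    else (s.1.insert p.2 p.1,
          (s.2.1.getD p.2 []).foldl (fun d i => d.insert i p.1) s.2.2)
  let sq := p.2 * p.2
  if fd.1.contains sq then (fd.1, s.2.1, fd.2.insert p.1 (fd.1.getD sq 0))
  else (fd.1, s.2.1.modify sq [] (fun l => l ++ [p.1]), fd.2)

-- second loop of B: emit [i, done[i]] for i in range(len(arr)) in index order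
def bEmit (arr : List Int)
    (st : PySem.Dict Int Int × PySem.Dict Int (List Int) × PySem.Dict Int Int) :
    List (List Int) :=
  (PySem.List.pyRange 0 (PySem.List.len arr) 1).foldl
    (fun res i => if st.2.2.contains i then res ++ [[i, st.2.2.getD i 0]] else res) []

def find_squared_alt (arr : List Int) : List (List Int) :=
  bEmit arr
    ((PySem.List.enumerate arr).foldl bStep
      (PySem.Dict.empty, PySem.Dict.empty, PySem.Dict.empty))

-- ===== PRECONDITION & SPEC =====
def Spec_find_squared (arr : List Int) (out : List (List Int)) : Prop := out = find_squared_alt arr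
instance (arr : List Int) (out : List (List Int)) : Decidable (Spec_find_squared arr out) := by unfold Spec_find_squared; infer_instance

-- ===== CLAIM (what is proved, stated in full; the proofs are below) =====
def Claim_equal_find_squared : Prop := ∀ (arr : List Int), Dom_find_squared arr → Spec_find_squared arr (find_squared arr)

-- ===== LEMMAS AND PROOFS =====

-- index of the first element of the list equal to v, counting from s (proof-only helper)
def firstMatch : List Int → Int → Int → Option Int
  | [], _, _ => none
  | x :: xs, v, s => if x = v then some s else firstMatch xs v (s + 1)

theorem firstMatch_append (l₁ l₂ : List Int) (v s : Int) :
    firstMatch (l₁ ++ l₂) v s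
      = (firstMatch l₁ v s).or (firstMatch l₂ v (s + l₁.length)) := by
  induction l₁ generalizing s with
  | nil => simp [firstMatch]
  | cons x xs ih =>
    by_cases h : x = v
    · simp [firstMatch, h]
    · simp only [List.cons_append, firstMatch, if_neg h, ih, List.length_cons]
      congr 1
      push_cast
      ring_nf

theorem firstMatch_eq_none_iff (l : List Int) (v s : Int) :
    firstMatch l v s = none ↔ v ∉ l := by
  induction l generalizing s with
  | nil => simp [firstMatch]
  | cons x xs ih =>
    by_cases h : x = v
    · simp [firstMatch, h]
    · have hne : v ≠ x := fun hvx => h hvx.symm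
      simp [firstMatch, if_neg h, ih, hne]

-- A's first-occurrence map's lookup is exactly the forward scan firstMatch
theorem build_get? (arr : List Int) (s : Int) (d : PySem.Dict Int Int) (v : Int) :
    ((PySem.List.enumerate arr s).foldl
      (fun m p => if m.contains p.2 then m else m.insert p.2 p.1) d).get? v
    = match d.get? v with
      | some j => some j
      | none => firstMatch arr v s := by
  induction arr generalizing s d with
  | nil => simp [PySem.List.enumerate_nil]; cases d.get? v <;> simp [firstMatch]
  | cons x xs ih =>
    rw [PySem.List.enumerate_cons]
    simp only [List.foldl_cons, ih]
    by_cases hc : d.contains x = true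
    · simp only [hc, if_pos]
      cases hg : d.get? v with
      | some j => simp
      | none =>
        simp only [firstMatch]
        by_cases hv : x = v
        · exfalso
          rw [PySem.Dict.contains_eq_isSome_get?, hv, hg] at hc
          simp at hc
        · rw [if_neg hv]
    · simp only [hc, if_neg, Bool.false_eq_true, not_false_iff, if_neg]
      rw [PySem.Dict.get?_insert]
      by_cases hv : v = x
      · subst hv
        have hg : d.get? v = none := by
          rw [PySem.Dict.contains_eq_isSome_get?] at hc
          cases h : d.get? v <;> simp [h] at hc ⊢
        simp [hg, firstMatch]
      · simp only [if_neg hv]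
        cases hg : d.get? v with
        | some j => simp
        | none => simp only [firstMatch]; rw [if_neg (fun h => hv h.symm)]

-- the common reference program: append [i, firstMatch arr (x*x) 0] for each (i, x)
def enumFM (arr : List Int) : List (List Int) :=
  (PySem.List.enumerate arr).foldl
    (fun res p =>
      match firstMatch arr (p.2 * p.2) 0 with
      | some j => res ++ [[p.1, j]]
      | none => res) []

-- A's loop body agrees with the reference body whenever the map's lookup is firstMatch
theorem step_eq (arr : List Int) (m : PySem.Dict Int Int)
    (hm : ∀ v, m.get? v = firstMatch arr v 0) (res : List (List Int)) (p : Int × Int) :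
    (if m.contains (p.2 * p.2) then res ++ [[p.1, m.getD (p.2 * p.2) 0]] else res)
    = match firstMatch arr (p.2 * p.2) 0 with
      | some j => res ++ [[p.1, j]]
      | none => res := by
  rw [PySem.Dict.contains_eq_isSome_get?, PySem.Dict.getD_eq_get?_getD, hm]
  cases firstMatch arr (p.2 * p.2) 0 <;> simp

theorem A_eq_enumFM (arr : List Int) : find_squared arr = enumFM arr := by
  unfold find_squared enumFM
  apply PySem.List.foldl_congr_mem
  intro res p _
  apply step_eq
  intro v
  have h := build_get? arr 0 PySem.Dict.empty v
  simpa [PySem.Dict.get?_empty] using h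

-- lookup after a fold inserting the constant value c at each key of l
theorem get?_foldl_insert_const (l : List Int) (c : Int) (d : PySem.Dict Int Int) (i : Int) :
    ((l.foldl (fun d i => d.insert i c) d).get? i) = if i ∈ l then some c else d.get? i := by
  induction l generalizing d with
  | nil => simp
  | cons a l ih =>
    simp only [List.foldl_cons, ih, List.mem_cons]
    by_cases h : i ∈ l
    · simp [h]
    · by_cases ha : i = a
      · simp [ha, PySem.Dict.get?_insert_self]
      · simp [h, ha, PySem.Dict.get?_insert_of_ne (hne := ha)]

-- invariant of B's single pass after processing the first k elements
def BInv (arr : List Int) (k : Nat)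
    (s : PySem.Dict Int Int × PySem.Dict Int (List Int) × PySem.Dict Int Int) : Prop :=
  (∀ v, s.1.get? v = firstMatch (arr.take k) v 0)
  ∧ (∀ (v i : Int), i ∈ s.2.1.getD v [] ↔
      ∃ (m : Nat) (hm : m < arr.length), m < k ∧ i = (m : Int) ∧
        arr[m]'hm * arr[m]'hm = v ∧ v ∉ arr.take (m + 1))
  ∧ (∀ (m : Nat) (hm : m < arr.length), m < k →
      s.2.2.get? (m : Int) = firstMatch (arr.take k) (arr[m]'hm * arr[m]'hm) 0)
  ∧ (∀ i : Int, (k : Int) ≤ i → s.2.2.get? i = none)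

theorem inv_step (arr : List Int) (k : Nat) (hk : k < arr.length) s
    (h : BInv arr k s) : BInv arr (k + 1) (bStep s ((k : Int), arr[k]'hk)) := by
  obtain ⟨first, pending, done⟩ := s
  obtain ⟨h1, h2, h3, h4⟩ := h
  simp only at h1 h2 h3 h4
  have htake : arr.take (k + 1) = arr.take k ++ [arr[k]'hk] := by
    rw [List.take_add_one]
    simp [List.getElem?_eq_getElem hk]
  have hFM : ∀ v, firstMatch (arr.take (k + 1)) v 0
      = (firstMatch (arr.take k) v 0).or (if arr[k]'hk = v then some (k : Int) else none) := by
    intro v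
    rw [htake, firstMatch_append]
    have hlen : ((arr.take k).length : Int) = (k : Int) := by
      simp [List.length_take]; omega
    simp only [zero_add, hlen, firstMatch]
  have hpref : ∀ (v : Int) (m : Nat), m < k → v ∉ arr.take k → v ∉ arr.take (m + 1) := by
    intro v m hmk hv hvm
    apply hv
    have hsub : arr.take (m + 1) ⊆ arr.take k := by
      have hp := List.take_prefix (m + 1) (arr.take k)
      rw [List.take_take, min_eq_left (by omega)] at hp
      exact hp.subset
    exact hsub hvm
  by_cases hcx : first.contains (arr[k]'hk) = true
  · -- arr[k] already seen: first unchanged, nothing pending to resolve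
    have hxmem : arr[k]'hk ∈ arr.take k := by
      by_contra hnot
      rw [PySem.Dict.contains_eq_isSome_get?, h1,
        (firstMatch_eq_none_iff _ _ _).mpr hnot] at hcx
      simp at hcx
    have hFMeq : ∀ v, firstMatch (arr.take (k + 1)) v 0 = firstMatch (arr.take k) v 0 := by
      intro v
      rw [hFM v]
      by_cases hvx : arr[k]'hk = v
      · subst hvx
        cases hfm : firstMatch (arr.take k) (arr[k]'hk) 0 with
        | none => exact absurd ((firstMatch_eq_none_iff _ _ _).mp hfm) (not_not_intro hxmem)
        | some j => simp
      · simp [hvx]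
    by_cases hcsq : first.contains (arr[k]'hk * arr[k]'hk) = true
    · have hsqmem : arr[k]'hk * arr[k]'hk ∈ arr.take k := by
        by_contra hnot
        rw [PySem.Dict.contains_eq_isSome_get?, h1,
          (firstMatch_eq_none_iff _ _ _).mpr hnot] at hcsq
        simp at hcsq
      have hred : bStep (first, pending, done) ((k : Int), arr[k]'hk)
          = (first, pending,
             done.insert (k : Int) (first.getD (arr[k]'hk * arr[k]'hk) 0)) := by
        simp [bStep, hcx, hcsq]
      rw [hred]
      unfold BInv
      dsimp only
      refine ⟨fun v => by rw [hFMeq v]; exact h1 v, ?_, ?_, ?_⟩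
      · intro v i
        rw [h2 v i]
        constructor
        · rintro ⟨m, hm, hmk, rfl, hv, hnv⟩
          exact ⟨m, hm, by omega, rfl, hv, hnv⟩
        · rintro ⟨m, hm, hmk1, rfl, hv, hnv⟩
          rcases Nat.lt_succ_iff_lt_or_eq.mp hmk1 with hmk | rfl
          · exact ⟨m, hm, hmk, rfl, hv, hnv⟩
          · exfalso
            apply hnv
            rw [htake]
            exact List.mem_append_left _ (hv ▸ hsqmem)
      · intro m hm hmk1
        rw [hFMeq]
        rcases Nat.lt_succ_iff_lt_or_eq.mp hmk1 with hmk | rfl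
        · rw [PySem.Dict.get?_insert_of_ne (hne := by omega)]
          exact h3 m hm hmk
        · rw [PySem.Dict.get?_insert_self]
          have hg := h1 (arr[m]'hm * arr[m]'hm)
          rw [PySem.Dict.getD_eq_get?_getD, hg]
          cases hfm : firstMatch (arr.take m) (arr[m]'hm * arr[m]'hm) 0 with
          | none => exact absurd ((firstMatch_eq_none_iff _ _ _).mp hfm) (not_not_intro hsqmem)
          | some j => simp
      · intro i hi
        rw [PySem.Dict.get?_insert_of_ne (hne := by omega)]
        exact h4 i (by omega)
    · have hsqnot : arr[k]'hk * arr[k]'hk ∉ arr.take k := by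
        intro hmem
        rw [PySem.Dict.contains_eq_isSome_get?, h1] at hcsq
        cases hfm : firstMatch (arr.take k) (arr[k]'hk * arr[k]'hk) 0 with
        | none => exact absurd hmem ((firstMatch_eq_none_iff _ _ _).mp hfm)
        | some j => rw [hfm] at hcsq; simp at hcsq
      have hsqx : arr[k]'hk * arr[k]'hk ≠ arr[k]'hk := fun he =>
        hsqnot (by rw [he]; exact hxmem)
      have hsqnot1 : arr[k]'hk * arr[k]'hk ∉ arr.take (k + 1) := by
        rw [htake]
        intro hmem
        rcases List.mem_append.mp hmem with hmem | hmem
        · exact hsqnot hmem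
        · exact hsqx (List.mem_singleton.mp hmem)
      have hred : bStep (first, pending, done) ((k : Int), arr[k]'hk)
          = (first, pending.modify (arr[k]'hk * arr[k]'hk) [] (fun l => l ++ [(k : Int)]),
             done) := by
        simp [bStep, hcx, hcsq]
      rw [hred]
      unfold BInv
      dsimp only
      refine ⟨fun v => by rw [hFMeq v]; exact h1 v, ?_, ?_,
        fun i hi => h4 i (by omega)⟩
      · intro v i
        rw [PySem.Dict.getD_modify]
        by_cases hvsq : v = arr[k]'hk * arr[k]'hk
        · subst hvsq
          rw [if_pos rfl]
          simp only [List.mem_append, List.mem_singleton, h2]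
          constructor
          · rintro (⟨m, hm, hmk, rfl, hv, hnv⟩ | rfl)
            · exact ⟨m, hm, by omega, rfl, hv, hnv⟩
            · exact ⟨k, hk, by omega, rfl, rfl, hsqnot1⟩
          · rintro ⟨m, hm, hmk1, rfl, hv, hnv⟩
            rcases Nat.lt_succ_iff_lt_or_eq.mp hmk1 with hmk | rfl
            · exact Or.inl ⟨m, hm, hmk, rfl, hv, hnv⟩
            · exact Or.inr rfl
        · rw [if_neg hvsq, h2 v i]
          constructor
          · rintro ⟨m, hm, hmk, rfl, hv, hnv⟩
            exact ⟨m, hm, by omega, rfl, hv, hnv⟩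
          · rintro ⟨m, hm, hmk1, rfl, hv, hnv⟩
            rcases Nat.lt_succ_iff_lt_or_eq.mp hmk1 with hmk | rfl
            · exact ⟨m, hm, hmk, rfl, hv, hnv⟩
            · exact absurd hv.symm hvsq
      · intro m hm hmk1
        rcases Nat.lt_succ_iff_lt_or_eq.mp hmk1 with hmk | rfl
        · rw [h3 m hm hmk, hFMeq]
        · rw [h4 (m : Int) (by omega), hFMeq,
            (firstMatch_eq_none_iff _ _ _).mpr hsqnot]
  · -- arr[k] is new: insert into first and resolve all pending indices waiting on it
    have hxnot : arr[k]'hk ∉ arr.take k := by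
      intro hmem
      rw [PySem.Dict.contains_eq_isSome_get?, h1] at hcx
      cases hfm : firstMatch (arr.take k) (arr[k]'hk) 0 with
      | none => exact absurd hmem ((firstMatch_eq_none_iff _ _ _).mp hfm)
      | some j => rw [hfm] at hcx; simp at hcx
    have hP : ∀ i : Int, i ∈ pending.getD (arr[k]'hk) [] ↔
        ∃ (m : Nat) (hm : m < arr.length), m < k ∧ i = (m : Int) ∧
          arr[m]'hm * arr[m]'hm = arr[k]'hk := by
      intro i
      rw [h2]
      constructor
      · rintro ⟨m, hm, hmk, rfl, hv, _⟩
        exact ⟨m, hm, hmk, rfl, hv⟩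
      · rintro ⟨m, hm, hmk, rfl, hv⟩
        exact ⟨m, hm, hmk, rfl, hv, hpref _ m hmk hxnot⟩
    have h1' : ∀ v, (first.insert (arr[k]'hk) (k : Int)).get? v
        = firstMatch (arr.take (k + 1)) v 0 := by
      intro v
      rw [PySem.Dict.get?_insert, hFM]
      by_cases hvx : v = arr[k]'hk
      · subst hvx
        rw [if_pos rfl, if_pos rfl, (firstMatch_eq_none_iff _ _ _).mpr hxnot]
        simp
      · rw [if_neg hvx, if_neg (fun he => hvx he.symm), h1]
        simp
    have hdone' : ∀ i : Int,
        (((pending.getD (arr[k]'hk) []).foldl (fun d i => d.insert i (k : Int)) done).get? i)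
        = if i ∈ pending.getD (arr[k]'hk) [] then some (k : Int) else done.get? i :=
      fun i => get?_foldl_insert_const _ _ _ _
    have hdm : ∀ (m : Nat) (hm : m < arr.length), m < k →
        (((pending.getD (arr[k]'hk) []).foldl (fun d i => d.insert i (k : Int)) done).get? (m : Int))
        = firstMatch (arr.take (k + 1)) (arr[m]'hm * arr[m]'hm) 0 := by
      intro m hm hmk
      rw [hdone']
      by_cases hmP : (m : Int) ∈ pending.getD (arr[k]'hk) []
      · rw [if_pos hmP]
        obtain ⟨m', hm', _, he, hv⟩ := (hP _).mp hmP
        have hmm : m' = m := by omega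
        subst hmm
        rw [hv, hFM, (firstMatch_eq_none_iff _ _ _).mpr hxnot, if_pos rfl]
        simp
      · rw [if_neg hmP, h3 m hm hmk, hFM]
        have hne : arr[k]'hk ≠ arr[m]'hm * arr[m]'hm := by
          intro he
          exact hmP ((hP _).mpr ⟨m, hm, hmk, rfl, he.symm⟩)
        rw [if_neg hne]
        simp
    have hnP : ∀ i : Int, (k : Int) ≤ i → i ∉ pending.getD (arr[k]'hk) [] := by
      intro i hi hmem
      obtain ⟨m, hm, hmk, he, _⟩ := (hP _).mp hmem
      omega
    have hdk : (((pending.getD (arr[k]'hk) []).foldl (fun d i => d.insert i (k : Int)) done).get? (k : Int))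
        = none := by
      rw [hdone', if_neg (hnP _ (le_refl _))]
      exact h4 _ (le_refl _)
    have hdge : ∀ i : Int, ((k : Int) + 1) ≤ i →
        (((pending.getD (arr[k]'hk) []).foldl (fun d i => d.insert i (k : Int)) done).get? i)
        = none := by
      intro i hi
      rw [hdone', if_neg (hnP i (by omega))]
      exact h4 i (by omega)
    by_cases hcsq : (first.insert (arr[k]'hk) (k : Int)).contains (arr[k]'hk * arr[k]'hk) = true
    · have hsqmem : arr[k]'hk * arr[k]'hk ∈ arr.take (k + 1) := by
        by_contra hnot
        rw [PySem.Dict.contains_eq_isSome_get?, h1',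
          (firstMatch_eq_none_iff _ _ _).mpr hnot] at hcsq
        simp at hcsq
      have hred : bStep (first, pending, done) ((k : Int), arr[k]'hk)
          = (first.insert (arr[k]'hk) (k : Int), pending,
             ((pending.getD (arr[k]'hk) []).foldl (fun d i => d.insert i (k : Int)) done).insert
               (k : Int)
               ((first.insert (arr[k]'hk) (k : Int)).getD (arr[k]'hk * arr[k]'hk) 0)) := by
        simp [bStep, hcx, hcsq]
      rw [hred]
      unfold BInv
      dsimp only
      refine ⟨h1', ?_, ?_, ?_⟩
      · intro v i
        rw [h2 v i]
        constructor
        · rintro ⟨m, hm, hmk, rfl, hv, hnv⟩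
          exact ⟨m, hm, by omega, rfl, hv, hnv⟩
        · rintro ⟨m, hm, hmk1, rfl, hv, hnv⟩
          rcases Nat.lt_succ_iff_lt_or_eq.mp hmk1 with hmk | rfl
          · exact ⟨m, hm, hmk, rfl, hv, hnv⟩
          · exact absurd (hv ▸ hsqmem) hnv
      · intro m hm hmk1
        rcases Nat.lt_succ_iff_lt_or_eq.mp hmk1 with hmk | rfl
        · rw [PySem.Dict.get?_insert_of_ne (hne := by omega)]
          exact hdm m hm hmk
        · rw [PySem.Dict.get?_insert_self]
          have hg := h1' (arr[m]'hm * arr[m]'hm)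
          rw [PySem.Dict.getD_eq_get?_getD, hg]
          cases hfm : firstMatch (arr.take (m + 1)) (arr[m]'hm * arr[m]'hm) 0 with
          | none => exact absurd ((firstMatch_eq_none_iff _ _ _).mp hfm) (not_not_intro hsqmem)
          | some j => simp
      · intro i hi
        rw [PySem.Dict.get?_insert_of_ne (hne := by omega)]
        exact hdge i (by omega)
    · have hsqnot1 : arr[k]'hk * arr[k]'hk ∉ arr.take (k + 1) := by
        intro hmem
        rw [PySem.Dict.contains_eq_isSome_get?, h1'] at hcsq
        cases hfm : firstMatch (arr.take (k + 1)) (arr[k]'hk * arr[k]'hk) 0 with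
        | none => exact absurd hmem ((firstMatch_eq_none_iff _ _ _).mp hfm)
        | some j => rw [hfm] at hcsq; simp at hcsq
      have hred : bStep (first, pending, done) ((k : Int), arr[k]'hk)
          = (first.insert (arr[k]'hk) (k : Int),
             pending.modify (arr[k]'hk * arr[k]'hk) [] (fun l => l ++ [(k : Int)]),
             ((pending.getD (arr[k]'hk) []).foldl (fun d i => d.insert i (k : Int)) done)) := by
        simp [bStep, hcx, hcsq]
      rw [hred]
      unfold BInv
      dsimp only
      refine ⟨h1', ?_, ?_, ?_⟩
      · intro v i
        rw [PySem.Dict.getD_modify]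
        by_cases hvsq : v = arr[k]'hk * arr[k]'hk
        · subst hvsq
          rw [if_pos rfl]
          simp only [List.mem_append, List.mem_singleton, h2]
          constructor
          · rintro (⟨m, hm, hmk, rfl, hv, hnv⟩ | rfl)
            · exact ⟨m, hm, by omega, rfl, hv, hnv⟩
            · exact ⟨k, hk, by omega, rfl, rfl, hsqnot1⟩
          · rintro ⟨m, hm, hmk1, rfl, hv, hnv⟩
            rcases Nat.lt_succ_iff_lt_or_eq.mp hmk1 with hmk | rfl
            · exact Or.inl ⟨m, hm, hmk, rfl, hv, hnv⟩
            · exact Or.inr rfl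
        · rw [if_neg hvsq, h2 v i]
          constructor
          · rintro ⟨m, hm, hmk, rfl, hv, hnv⟩
            exact ⟨m, hm, by omega, rfl, hv, hnv⟩
          · rintro ⟨m, hm, hmk1, rfl, hv, hnv⟩
            rcases Nat.lt_succ_iff_lt_or_eq.mp hmk1 with hmk | rfl
            · exact ⟨m, hm, hmk, rfl, hv, hnv⟩
            · exact absurd hv.symm hvsq
      · intro m hm hmk1
        rcases Nat.lt_succ_iff_lt_or_eq.mp hmk1 with hmk | rfl
        · exact hdm m hm hmk
        · rw [hdk, (firstMatch_eq_none_iff _ _ _).mpr hsqnot1]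
      · intro i hi
        exact hdge i (by omega)

theorem inv_take (arr : List Int) (k : Nat) (hk : k ≤ arr.length) :
    BInv arr k
      ((PySem.List.enumerate (arr.take k)).foldl bStep
        (PySem.Dict.empty, PySem.Dict.empty, PySem.Dict.empty)) := by
  induction k with
  | zero =>
    refine ⟨fun v => by simp [PySem.Dict.get?_empty, firstMatch, PySem.List.enumerate_nil],
      fun v i => ?_, fun m hm hmk => by omega, fun i hi => by
        simp [PySem.Dict.get?_empty, PySem.List.enumerate_nil]⟩
    simp only [List.take_zero, PySem.List.enumerate_nil, List.foldl_nil]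
    simp [PySem.Dict.getD_empty]
  | succ k ih =>
    have hk' : k < arr.length := by omega
    have htake : arr.take (k + 1) = arr.take k ++ [arr[k]'hk'] := by
      rw [List.take_add_one]
      simp [List.getElem?_eq_getElem hk']
    have hlen : (arr.take k).length = k := by simp [List.length_take]; omega
    rw [htake, PySem.List.enumerate_append, hlen, PySem.List.enumerate_cons,
      PySem.List.enumerate_nil, List.foldl_append]
    simp only [List.foldl_cons, List.foldl_nil, zero_add]
    exact inv_step arr k hk' _ (ih (by omega))

theorem inv_foldl (arr : List Int) :
    BInv arr arr.length
      ((PySem.List.enumerate arr).foldl bStep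
        (PySem.Dict.empty, PySem.Dict.empty, PySem.Dict.empty)) := by
  have h := inv_take arr arr.length (le_refl _)
  rwa [List.take_length] at h

theorem B_eq_enumFM (arr : List Int) : find_squared_alt arr = enumFM arr := by
  unfold find_squared_alt bEmit enumFM
  obtain ⟨h1, h2, h3, h4⟩ := inv_foldl arr
  conv_rhs => rw [PySem.List.enumerate_eq_map_pyRange (d := 0), List.foldl_map]
  apply PySem.List.foldl_congr_mem
  intro res i hi
  rw [PySem.List.mem_pyRange_one] at hi
  obtain ⟨hi0, hin⟩ := hi
  have hm : i.toNat < arr.length := by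
    simp [PySem.List.len] at hin
    omega
  have hieq : i = ((i.toNat : Nat) : Int) := by omega
  have hget : PySem.List.pyGetD arr i 0 = arr[i.toNat]'hm := by
    conv_lhs => rw [hieq]
    rw [PySem.List.pyGetD_natCast]
    simp [List.getD_eq_getElem?_getD, List.getElem?_eq_getElem hm]
  have hdone := h3 i.toNat hm hm
  rw [List.take_length, ← hieq] at hdone
  rw [PySem.Dict.contains_eq_isSome_get?, PySem.Dict.getD_eq_get?_getD, hdone, hget]
  cases firstMatch arr (arr[i.toNat]'hm * arr[i.toNat]'hm) 0 with
  | none => simp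
  | some j => simp

-- ===== VERDICT (by name: the statement is the Claim_ definition above) =====
theorem find_squared_spec : Claim_equal_find_squared := by
  intro arr _
  unfold Spec_find_squared
  rw [A_eq_enumFM, B_eq_enumFM]
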